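-- pv_equiv track=rewrite | github.com/daeni-dang/Baekjoon_with_python | 스터디/0203/10026. 적록색약.py | solution
-- ===== SOURCE A (Python) =====
-- def dfs(x, y, board, N, visited, color):
--     if x < N and x >= 0 and y < N and y >= 0:
--         if not visited[x][y] and color == board[x][y]:
--             visited[x][y] = True
--             dfs(x + 1, y, board, N, visited, color)
--             dfs(x - 1, y, board, N, visited, color)
--             dfs(x, y + 1, board, N, visited, color)
--             dfs(x, y - 1, board, N, visited, color)
--
-- def solution(N, board):
--     yes, no = 0, 0
--     visited = [[False] * N for _ in range(N)]
--     for i in range(N):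
--         for j in range(N):
--             if not visited[i][j]:
--                 dfs(i, j, board, N, visited, board[i][j])
--                 yes += 1
--     visited = [[False] * N for _ in range(N)]
--     for i in range(N):
--         for j in range(N):
--             if board[i][j] == 'R':
--                 board[i][j] = 'G'
--     for i in range(N):
--         for j in range(N):
--             if not visited[i][j]:
--                 dfs(i, j, board, N, visited, board[i][j])
--                 no += 1
--     return yes, no
-- ===== SOURCE B (Python) =====
-- # B: iterative flood fill with an explicit stack instead of recursive DFS.
-- # Note: unlike A, B does not mutate the caller's board (it builds the
-- # colorblind board as a new list); the return value is identical.
-- def solution(N, board):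
--     def count(b):
--         visited = [[False] * N for _ in range(N)]
--         regions = 0
--         for i in range(N):
--             for j in range(N):
--                 if visited[i][j]:
--                     continue
--                 regions += 1
--                 color = b[i][j]
--                 stack = [(i, j)]
--                 while stack:
--                     x, y = stack.pop()
--                     if 0 <= x < N and 0 <= y < N and not visited[x][y] and color == b[x][y]:
--                         visited[x][y] = True
--                         stack.append((x, y - 1))
--                         stack.append((x, y + 1))
--                         stack.append((x - 1, y))
--                         stack.append((x + 1, y))
--         return regions
--     yes = count(board)
--     no = count([['G' if c == 'R' else c for c in row] for row in board])
--     return yes, no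
-- ===== Notes on version B (the rewrite author's own statement) =====
-- stated objective: alternative
-- what changed: Replaces A's recursive DFS flood fill (and its in-place R->G board mutation) by an iterative flood fill with an explicit stack and a freshly built colorblind board; B avoids Python's recursion entirely.
import Mathlib
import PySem

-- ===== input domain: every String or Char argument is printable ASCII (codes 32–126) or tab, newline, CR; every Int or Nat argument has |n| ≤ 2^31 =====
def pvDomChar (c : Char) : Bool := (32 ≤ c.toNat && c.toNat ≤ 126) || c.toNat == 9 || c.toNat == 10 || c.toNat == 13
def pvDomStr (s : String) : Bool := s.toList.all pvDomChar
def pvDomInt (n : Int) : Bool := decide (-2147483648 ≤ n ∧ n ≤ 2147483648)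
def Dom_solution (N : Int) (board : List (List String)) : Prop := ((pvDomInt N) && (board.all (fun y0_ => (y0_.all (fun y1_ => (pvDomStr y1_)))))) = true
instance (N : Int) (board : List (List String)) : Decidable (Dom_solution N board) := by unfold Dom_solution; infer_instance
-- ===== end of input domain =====

-- B replaces A's recursive DFS flood fill by an iterative flood fill with an explicit
-- stack (objective: alternative decomposition, no recursion).  Equivalence is about the
-- RETURN value: A mutates the caller's board in place (R→G) while B builds a new board.

-- cell accessors shared by both ports (Python visited[x][y] / board[x][y]; both ports
-- only read/write them after the 0 ≤ x,y < N bounds check, so Nat indexing is exact)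
def vgetN (v : List (List Bool)) (i j : Nat) : Bool := (v.getD i []).getD j false
def vsetN (v : List (List Bool)) (i j : Nat) : List (List Bool) := v.modify i (fun r => r.set j true)
def bgetN (b : List (List String)) (i j : Nat) : String := (b.getD i []).getD j ""

-- ===== PORT A =====
-- recursive dfs of A; the fuel argument only makes the recursion total (it is chosen
-- large enough below and proved irrelevant): each productive level marks one cell
def dfsA : Nat → Int → Int → List (List String) → Nat → List (List Bool) → String → List (List Bool)
  | 0, _, _, _, _, v, _ => v
  | f+1, x, y, b, n, v, c =>
    if x < (n : Int) ∧ 0 ≤ x ∧ y < (n : Int) ∧ 0 ≤ y then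
      if vgetN v x.toNat y.toNat = false ∧ c = bgetN b x.toNat y.toNat then
        dfsA f x (y-1) b n (dfsA f x (y+1) b n (dfsA f (x-1) y b n (dfsA f (x+1) y b n (vsetN v x.toNat y.toNat) c) c) c) c
      else v
    else v

-- one region-counting double loop of A (A's source repeats it verbatim for yes and no)
def countA (b : List (List String)) (n : Nat) : Int :=
  ((List.range n).foldl (fun st i =>
    (List.range n).foldl (fun st j =>
      if vgetN st.1 i j = true then st
      else (dfsA (n*n+1) (i : Int) (j : Int) b n st.1 (bgetN b i j), st.2 + 1)) st)
    (List.replicate n (List.replicate n false), (0 : Int))).2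

-- A's in-place mutation loop: board[i][j] = 'G' wherever board[i][j] == 'R'
def mutA (b : List (List String)) (n : Nat) : List (List String) :=
  (List.range n).foldl (fun b i =>
    (List.range n).foldl (fun b j =>
      if bgetN b i j = "R" then b.modify i (fun r => r.set j "G") else b) b) b

def solution (N : Int) (board : List (List String)) : Int × Int :=
  (countA board N.toNat, countA (mutA board N.toNat) N.toNat)

-- ===== PORT B =====
-- B's while-loop over an explicit stack; the list head is the top of the stack, fuel
-- only makes the loop total (each step pops one entry or marks one cell pushing four)
def stackB : Nat → List (List String) → Nat → String → List (Int × Int) → List (List Bool) → List (List Bool)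
  | 0, _, _, _, _, v => v
  | _+1, _, _, _, [], v => v
  | f+1, b, n, c, (x, y) :: s, v =>
    if (0 ≤ x ∧ x < (n : Int)) ∧ (0 ≤ y ∧ y < (n : Int)) ∧ vgetN v x.toNat y.toNat = false ∧ c = bgetN b x.toNat y.toNat then
      stackB f b n c ((x+1,y) :: (x-1,y) :: (x,y+1) :: (x,y-1) :: s) (vsetN v x.toNat y.toNat)
    else stackB f b n c s v

-- B's count helper: same double loop, iterative flood fill from each unvisited cell
def countB (b : List (List String)) (n : Nat) : Int :=
  ((List.range n).foldl (fun st i =>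
    (List.range n).foldl (fun st j =>
      if vgetN st.1 i j = true then st
      else (stackB (5*(n*n)+2) b n (bgetN b i j) [((i : Int), (j : Int))] st.1, st.2 + 1)) st)
    (List.replicate n (List.replicate n false), (0 : Int))).2

-- B's colorblind board, built fresh by comprehension
def colorblind (b : List (List String)) : List (List String) :=
  b.map (fun row => row.map (fun c => if c = "R" then "G" else c))

def solution_alt (N : Int) (board : List (List String)) : Int × Int :=
  (countB board N.toNat, countB (colorblind board) N.toNat)

-- ===== PRECONDITION & SPEC =====
-- A indexes board[i][j] for all 0 ≤ i,j < N: it raises IndexError unless the board has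
-- at least N rows whose first N each have at least N entries; exactly that is Pre_.
def Pre_solution (N : Int) (board : List (List String)) : Prop :=
  N.toNat ≤ board.length ∧ ∀ row ∈ board.take N.toNat, N.toNat ≤ row.length
instance (N : Int) (board : List (List String)) : Decidable (Pre_solution N board) := by unfold Pre_solution; infer_instance

def pvWitness_solution : Int × List (List String) := (2, [["R", "G"], ["B", "B"]])

def Spec_solution (N : Int) (board : List (List String)) (out : Int × Int) : Prop := out = solution_alt N board
instance (N : Int) (board : List (List String)) (out : Int × Int) : Decidable (Spec_solution N board out) := by unfold Spec_solution; infer_instance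

-- ===== CLAIM (what is proved, stated in full; the proofs are below) =====
def Claim_equal_solution : Prop := ∀ (N : Int) (board : List (List String)), Dom_solution N board → Pre_solution N board → Spec_solution N board (solution N board)

-- ===== LEMMAS AND PROOFS =====

-- visited-matrix shape and number of unvisited cells
def Sh (n : Nat) (v : List (List Bool)) : Prop := v.length = n ∧ ∀ r ∈ v, r.length = n
def unv (v : List (List Bool)) : Nat := (v.map (fun r => r.count false)).sum

theorem sh_vset {n : Nat} {v : List (List Bool)} (h : Sh n v) (i j : Nat) : Sh n (vsetN v i j) := by
  obtain ⟨h1, h2⟩ := h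
  refine ⟨by simpa [vsetN] using h1, ?_⟩
  intro r hr
  by_cases hi : i < v.length
  · rw [vsetN, List.modify_eq_set_get _ hi] at hr
    rcases List.mem_or_eq_of_mem_set hr with h | h
    · exact h2 r h
    · subst h
      rw [List.length_set]
      exact h2 _ (List.get_mem v ⟨i, hi⟩)
  · rw [vsetN, List.modify_eq_self (by omega)] at hr
    exact h2 r hr

theorem countFalse_set_le (r : List Bool) (j : Nat) : (r.set j true).count false ≤ r.count false := by
  induction r generalizing j with
  | nil => simp
  | cons a r ih =>
    cases j with
    | zero => cases a <;> simp
    | succ j => cases a <;> simpa using ih j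

theorem countFalse_set (r : List Bool) (j : Nat) (hj : j < r.length) (h : r.getD j false = false) :
    (r.set j true).count false + 1 = r.count false := by
  induction r generalizing j with
  | nil => simp at hj
  | cons a r ih =>
    cases j with
    | zero =>
      simp only [List.getD_cons_zero] at h
      subst h
      simp
    | succ j =>
      simp only [List.getD_cons_succ] at h
      simp only [List.length_cons, Nat.succ_lt_succ_iff] at hj
      cases a <;> simp [← ih j hj h]

theorem unv_cons (r : List Bool) (v : List (List Bool)) : unv (r :: v) = r.count false + unv v := by
  simp [unv]

theorem unv_vset_le (v : List (List Bool)) (i j : Nat) : unv (vsetN v i j) ≤ unv v := by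
  induction v generalizing i with
  | nil => simp [vsetN]
  | cons r v ih =>
    cases i with
    | zero =>
      simp only [vsetN, List.modify_zero_cons, unv_cons]
      have := countFalse_set_le r j
      omega
    | succ i =>
      simp only [vsetN, List.modify_succ_cons, unv_cons]
      have := ih i
      simp only [vsetN] at this
      omega

theorem unv_vset' (v : List (List Bool)) (i j : Nat) (hi : i < v.length)
    (hj : j < (v.getD i []).length) (hf : vgetN v i j = false) :
    unv (vsetN v i j) + 1 = unv v := by
  induction v generalizing i with
  | nil => simp at hi
  | cons r v ih =>
    cases i with
    | zero =>
      simp only [List.getD_cons_zero] at hj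
      simp only [vgetN, List.getD_cons_zero] at hf
      simp only [vsetN, List.modify_zero_cons, unv_cons]
      have := countFalse_set r j hj hf
      omega
    | succ i =>
      simp only [List.length_cons, Nat.succ_lt_succ_iff] at hi
      simp only [List.getD_cons_succ] at hj
      simp only [vgetN, List.getD_cons_succ] at hf
      simp only [vsetN, List.modify_succ_cons, unv_cons]
      have := ih i hi hj hf
      simp only [vsetN] at this
      omega

theorem unv_vset {n : Nat} {v : List (List Bool)} (h : Sh n v) {i j : Nat} (hi : i < n) (hj : j < n)
    (hf : vgetN v i j = false) : unv (vsetN v i j) + 1 = unv v := by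
  obtain ⟨h1, h2⟩ := h
  have hiv : i < v.length := by omega
  refine unv_vset' v i j hiv ?_ hf
  rw [List.getD_eq_getElem v [] hiv]
  rw [h2 _ (v.getElem_mem hiv)]
  exact hj

theorem unv_le_sq {n : Nat} {v : List (List Bool)} (h : Sh n v) : unv v ≤ n * n := by
  obtain ⟨h1, h2⟩ := h
  have : ∀ w : List (List Bool), (∀ r ∈ w, r.length = n) → unv w ≤ w.length * n := by
    intro w
    induction w with
    | nil => simp [unv]
    | cons r w ih =>
      intro hw
      have hr : r.count false ≤ n := by
        have := List.count_le_length (a := false) (l := r)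
        have := hw r (by simp)
        omega
      have := ih (fun r' hr' => hw r' (by simp [hr']))
      rw [unv_cons]
      simp only [List.length_cons]
      calc r.count false + unv w ≤ n + w.length * n := by omega
        _ = (w.length + 1) * n := by ring
  have hv := this v h2
  rw [h1] at hv
  exact hv

theorem sh_dfsA {n : Nat} (f : Nat) (x y : Int) (b : List (List String)) {v : List (List Bool)} (c : String)
    (h : Sh n v) : Sh n (dfsA f x y b n v c) := by
  induction f generalizing x y v with
  | zero => exact h
  | succ g ih =>
    simp only [dfsA]
    split_ifs with h1 h2
    · exact ih _ _ (ih _ _ (ih _ _ (ih _ _ (sh_vset h _ _))))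
    · exact h
    · exact h

theorem unv_dfsA (f : Nat) (x y : Int) (b : List (List String)) (n : Nat) (v : List (List Bool)) (c : String) :
    unv (dfsA f x y b n v c) ≤ unv v := by
  induction f generalizing x y v with
  | zero => exact le_refl _
  | succ g ih =>
    simp only [dfsA]
    split_ifs with h1 h2
    · calc unv (dfsA g x (y-1) b n (dfsA g x (y+1) b n (dfsA g (x-1) y b n (dfsA g (x+1) y b n (vsetN v x.toNat y.toNat) c) c) c) c)
          ≤ unv (dfsA g x (y+1) b n (dfsA g (x-1) y b n (dfsA g (x+1) y b n (vsetN v x.toNat y.toNat) c) c) c) := ih _ _ _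
        _ ≤ unv (dfsA g (x-1) y b n (dfsA g (x+1) y b n (vsetN v x.toNat y.toNat) c) c) := ih _ _ _
        _ ≤ unv (dfsA g (x+1) y b n (vsetN v x.toNat y.toNat) c) := ih _ _ _
        _ ≤ unv (vsetN v x.toNat y.toNat) := ih _ _ _
        _ ≤ unv v := unv_vset_le v _ _
    · exact le_refl _
    · exact le_refl _

theorem stackB_fuel {n : Nat} : ∀ (f f' : Nat) (s : List (Int × Int)) (v : List (List Bool)) (b : List (List String)) (c : String),
    Sh n v → 5 * unv v + s.length + 1 ≤ f → 5 * unv v + s.length + 1 ≤ f' →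
    stackB f b n c s v = stackB f' b n c s v := by
  intro f
  induction f with
  | zero => intro f' s v b c _ hf _; omega
  | succ g ih =>
    intro f' s v b c hsh hf hf'
    cases f' with
    | zero => omega
    | succ g' =>
      cases s with
      | nil => rfl
      | cons p s =>
        obtain ⟨x, y⟩ := p
        simp only [stackB]
        split_ifs with h1
        · have hx : x.toNat < n := by omega
          have hy : y.toNat < n := by omega
          have hu0 : unv (vsetN v x.toNat y.toNat) + 1 = unv v := unv_vset hsh hx hy h1.2.2.1
          refine ih g' _ _ b c (sh_vset hsh _ _) ?_ ?_ <;> simp <;> simp at hf hf' <;> omega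
        · refine ih g' _ _ b c hsh ?_ ?_ <;> simp at hf hf' ⊢ <;> omega

theorem stackB_nil (f : Nat) (b : List (List String)) (n : Nat) (c : String) (v : List (List Bool)) :
    stackB f b n c [] v = v := by
  cases f <;> rfl

theorem bridge {n : Nat} : ∀ (f : Nat) (v : List (List Bool)) (x y : Int) (s : List (Int × Int)) (f2 f3 : Nat)
    (b : List (List String)) (c : String), Sh n v → unv v + 1 ≤ f →
    5 * unv v + s.length + 2 ≤ f2 → 5 * unv v + s.length + 2 ≤ f3 →
    stackB f2 b n c ((x, y) :: s) v = stackB f3 b n c s (dfsA f x y b n v c) := by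
  intro f
  induction f with
  | zero => intro v x y s f2 f3 b c _ hf _ _; omega
  | succ g ih =>
    intro v x y s f2 f3 b c hsh hf h2 h3
    obtain ⟨g2, rfl⟩ : ∃ g2, f2 = g2 + 1 := ⟨f2 - 1, by omega⟩
    by_cases hg : (0 ≤ x ∧ x < (n : Int)) ∧ (0 ≤ y ∧ y < (n : Int)) ∧ vgetN v x.toNat y.toNat = false ∧ c = bgetN b x.toNat y.toNat
    · -- guard holds: both flood fills mark (x,y) and continue
      have hA1 : (x < (n : Int) ∧ 0 ≤ x ∧ y < (n : Int) ∧ 0 ≤ y) := by tauto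
      have hA2 : vgetN v x.toNat y.toNat = false ∧ c = bgetN b x.toNat y.toNat := by tauto
      simp only [stackB, dfsA, if_pos hg, if_pos hA1, if_pos hA2]
      have hx : x.toNat < n := by omega
      have hy : y.toNat < n := by omega
      have hu0 : unv (vsetN v x.toNat y.toNat) + 1 = unv v := unv_vset hsh hx hy hA2.1
      set v0 := vsetN v x.toNat y.toNat with hv0
      have hsh0 : Sh n v0 := sh_vset hsh _ _
      rw [ih v0 (x+1) y ((x-1,y) :: (x,y+1) :: (x,y-1) :: s) g2 g2 b c hsh0 (by omega)
        (by simp only [List.length_cons]; omega) (by simp only [List.length_cons]; omega)]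
      set v1 := dfsA g (x+1) y b n v0 c with hv1
      have hsh1 : Sh n v1 := sh_dfsA _ _ _ _ _ hsh0
      have hu1 : unv v1 ≤ unv v0 := unv_dfsA _ _ _ _ _ _ _
      rw [ih v1 (x-1) y ((x,y+1) :: (x,y-1) :: s) g2 g2 b c hsh1 (by omega)
        (by simp only [List.length_cons]; omega) (by simp only [List.length_cons]; omega)]
      set v2 := dfsA g (x-1) y b n v1 c with hv2
      have hsh2 : Sh n v2 := sh_dfsA _ _ _ _ _ hsh1
      have hu2 : unv v2 ≤ unv v1 := unv_dfsA _ _ _ _ _ _ _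
      rw [ih v2 x (y+1) ((x,y-1) :: s) g2 g2 b c hsh2 (by omega)
        (by simp only [List.length_cons]; omega) (by simp only [List.length_cons]; omega)]
      set v3 := dfsA g x (y+1) b n v2 c with hv3
      have hsh3 : Sh n v3 := sh_dfsA _ _ _ _ _ hsh2
      have hu3 : unv v3 ≤ unv v2 := unv_dfsA _ _ _ _ _ _ _
      rw [ih v3 x (y-1) s g2 f3 b c hsh3 (by omega) (by omega) (by omega)]
    · -- guard fails: the popped cell is discarded and dfsA returns v unchanged
      have hres : dfsA (g+1) x y b n v c = v := by
        simp only [dfsA]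
        split_ifs with h1 hA2
        · exact absurd ⟨by tauto, by tauto, by tauto, by tauto⟩ hg
        · rfl
        · rfl
      rw [hres]
      simp only [stackB, if_neg hg]
      exact stackB_fuel g2 f3 s v b c hsh (by omega) (by omega)

theorem foldl_inv_congr {α β : Type} (Inv : β → Prop) (g1 g2 : β → α → β) :
    ∀ (l : List α) (s : β), Inv s → (∀ s a, Inv s → a ∈ l → g1 s a = g2 s a) →
    (∀ s a, Inv s → Inv (g1 s a)) → l.foldl g1 s = l.foldl g2 s := by
  intro l
  induction l with
  | nil => intro s _ _ _; rfl
  | cons a l ih =>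
    intro s hs hp hk
    simp only [List.foldl_cons]
    rw [← hp s a hs (by simp)]
    exact ih (g1 s a) (hk s a hs) (fun s' a' hs' ha' => hp s' a' hs' (by simp [ha'])) hk

theorem foldl_inv {α β : Type} (Inv : β → Prop) (g : β → α → β) :
    ∀ (l : List α) (s : β), Inv s → (∀ s a, Inv s → Inv (g s a)) → Inv (l.foldl g s) := by
  intro l
  induction l with
  | nil => intro s hs _; exact hs
  | cons a l ih => intro s hs hk; exact ih (g s a) (hk s a hs) hk

theorem countA_eq_countB (b : List (List String)) (n : Nat) : countA b n = countB b n := by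
  unfold countA countB
  congr 1
  refine foldl_inv_congr (fun st => Sh n st.1) _ _ (List.range n) _ ?_ ?_ ?_
  · constructor
    · simp
    · intro r hr
      rw [List.eq_of_mem_replicate hr]
      simp
  · -- the two inner loops agree on every shape-correct state
    intro st i hst _
    refine foldl_inv_congr (fun st => Sh n st.1) _ _ (List.range n) st hst ?_ ?_
    · intro st j hst' _
      by_cases hv : vgetN st.1 i j = true
      · simp [hv]
      · simp only [if_neg hv]
        refine Prod.ext ?_ rfl
        have hb := bridge (n := n) (n*n+1) st.1 (i : Int) (j : Int) [] (5*(n*n)+2) (5*(n*n)+2)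
          b (bgetN b i j) hst' (by have := unv_le_sq hst'; omega)
          (by have := unv_le_sq hst'; simp; omega) (by have := unv_le_sq hst'; simp; omega)
        rw [stackB_nil] at hb
        simp only [hb.symm]
    · intro st j hst'
      by_cases hv : vgetN st.1 i j = true
      · simpa [hv] using hst'
      · simp only [if_neg hv]
        exact sh_dfsA _ _ _ _ _ hst'
  · -- each inner loop of A preserves the shape of the visited matrix
    intro st i hst
    refine foldl_inv (fun st => Sh n st.1) _ (List.range n) st hst ?_
    intro st' j hst'
    by_cases hv : vgetN st'.1 i j = true
    · simpa [hv] using hst'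
    · simp only [if_neg hv]
      exact sh_dfsA _ _ _ _ _ hst' 

theorem stackB_congr {n : Nat} {b1 b2 : List (List String)}
    (hb : ∀ i j : Nat, i < n → j < n → bgetN b1 i j = bgetN b2 i j) :
    ∀ (f : Nat) (c : String) (s : List (Int × Int)) (v : List (List Bool)),
    stackB f b1 n c s v = stackB f b2 n c s v := by
  intro f
  induction f with
  | zero => intro c s v; rfl
  | succ g ih =>
    intro c s v
    cases s with
    | nil => rfl
    | cons p s =>
      obtain ⟨x, y⟩ := p
      by_cases hbd : (0 ≤ x ∧ x < (n : Int)) ∧ (0 ≤ y ∧ y < (n : Int))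
      · have hx : x.toNat < n := by omega
        have hy : y.toNat < n := by omega
        simp only [stackB, hb x.toNat y.toNat hx hy]
        split_ifs with h1
        · exact ih _ _ _
        · exact ih _ _ _
      · have h1 : ¬ ((0 ≤ x ∧ x < (n : Int)) ∧ (0 ≤ y ∧ y < (n : Int)) ∧ vgetN v x.toNat y.toNat = false ∧ c = bgetN b1 x.toNat y.toNat) := by tauto
        have h2 : ¬ ((0 ≤ x ∧ x < (n : Int)) ∧ (0 ≤ y ∧ y < (n : Int)) ∧ vgetN v x.toNat y.toNat = false ∧ c = bgetN b2 x.toNat y.toNat) := by tauto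
        simp only [stackB, if_neg h1, if_neg h2]
        exact ih _ _ _

theorem countB_congr {n : Nat} {b1 b2 : List (List String)}
    (hb : ∀ i j : Nat, i < n → j < n → bgetN b1 i j = bgetN b2 i j) :
    countB b1 n = countB b2 n := by
  unfold countB
  congr 1
  refine foldl_inv_congr (fun _ => True) _ _ (List.range n) _ trivial ?_ (fun _ _ _ => trivial)
  intro st i _ hi
  rw [List.mem_range] at hi
  refine foldl_inv_congr (fun _ => True) _ _ (List.range n) st trivial ?_ (fun _ _ _ => trivial)
  intro st j _ hj
  rw [List.mem_range] at hj
  by_cases hv : vgetN st.1 i j = true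
  · simp [hv]
  · simp only [if_neg hv, hb i j hi hj, stackB_congr hb]

-- one assignment step of A's mutation loop, at row level
def rstep (r : List String) (j : Nat) : List String := if r.getD j "" = "R" then r.set j "G" else r

theorem getD_set {α : Type} (l : List α) (k i : Nat) (x d : α) :
    (l.set k x).getD i d = if k = i ∧ k < l.length then x else l.getD i d := by
  rw [List.getD_eq_getElem?_getD, List.getD_eq_getElem?_getD, List.getElem?_set]
  by_cases hk : k = i
  · subst hk
    by_cases hl : k < l.length
    · simp [hl]
    · simp [hl]
  · simp [hk]

theorem rstep_length (r : List String) (j : Nat) : (rstep r j).length = r.length := by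
  unfold rstep; split_ifs <;> simp

theorem rowfold_getD_not : ∀ (js : List Nat) (r : List String) (j : Nat), j ∉ js →
    (js.foldl rstep r).getD j "" = r.getD j "" := by
  intro js
  induction js with
  | nil => intro r j _; rfl
  | cons k js ih =>
    intro r j hj
    rw [List.foldl_cons, ih _ _ (by simp at hj; tauto)]
    unfold rstep
    split_ifs with ht
    · rw [getD_set]
      have : k ≠ j := by simp at hj; tauto
      simp [this]
    · rfl

theorem rowfold_getD_mem : ∀ (js : List Nat) (r : List String) (j : Nat), js.Nodup → j < r.length → j ∈ js →
    (js.foldl rstep r).getD j "" = (if r.getD j "" = "R" then "G" else r.getD j "") := by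
  intro js
  induction js with
  | nil => intro r j _ _ hj; simp at hj
  | cons k js ih =>
    intro r j hnd hjr hj
    rw [List.foldl_cons]
    by_cases hjk : j = k
    · subst hjk
      have hnotin : j ∉ js := (List.nodup_cons.mp hnd).1
      rw [rowfold_getD_not js _ j hnotin]
      unfold rstep
      split_ifs with ht
      · rw [getD_set]; simp [hjr]
      · rfl
    · have hjs : j ∈ js := by simpa [hjk] using hj
      rw [ih (rstep r k) j (List.nodup_cons.mp hnd).2 (by rw [rstep_length]; exact hjr) hjs]
      have hch : (rstep r k).getD j "" = r.getD j "" := by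
        unfold rstep
        split_ifs with ht
        · rw [getD_set]
          have hne : k ≠ j := fun h => hjk h.symm
          simp [hne]
        · rfl
      rw [hch]

-- A's inner mutation loop over row i, rewritten as a single set of row i
theorem innerA_eq : ∀ (js : List Nat) (b : List (List String)) (i : Nat), i < b.length →
    js.foldl (fun b j => if bgetN b i j = "R" then b.modify i (fun r => r.set j "G") else b) b
      = b.set i (js.foldl rstep (b.getD i [])) := by
  intro js
  induction js with
  | nil =>
    intro b i hi
    rw [List.foldl_nil, List.foldl_nil, List.getD_eq_getElem b [] hi, List.set_getElem_self]
  | cons k js ih =>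
    intro b i hi
    simp only [bgetN] at ih ⊢
    rw [List.foldl_cons, List.foldl_cons]
    by_cases ht : (b.getD i []).getD k "" = "R"
    · rw [if_pos ht, List.modify_eq_set_get _ hi]
      have hbi : b.get ⟨i, hi⟩ = b.getD i [] := by rw [List.getD_eq_getElem b [] hi]; rfl
      rw [hbi, ih _ i (by simp [hi]), List.set_set]
      have h1 : (b.set i ((b.getD i []).set k "G")).getD i [] = (b.getD i []).set k "G" := by
        rw [getD_set]; simp [hi]
      rw [h1]
      have h2 : rstep (b.getD i []) k = (b.getD i []).set k "G" := by unfold rstep; rw [if_pos ht]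
      rw [h2]
    · rw [if_neg ht, ih _ i hi]
      have h2 : rstep (b.getD i []) k = b.getD i [] := by unfold rstep; rw [if_neg ht]
      rw [h2]

-- the whole-row effect of A's inner mutation loop
def rowF (n : Nat) (r : List String) : List String := (List.range n).foldl rstep r

-- a fold that sets each listed row once, read back at a listed row
theorem setfold_getD_mem (F : List String → List String) :
    ∀ (is : List Nat) (b : List (List String)) (i : Nat), is.Nodup → (∀ k ∈ is, k < b.length) → i ∈ is →
    ((is.foldl (fun b k => b.set k (F (b.getD k []))) b).getD i []) = F (b.getD i []) := by
  intro is
  induction is with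
  | nil => intro b i _ _ hi; simp at hi
  | cons k is ih =>
    intro b i hnd hlt hi
    rw [List.foldl_cons]
    by_cases hik : i = k
    · subst hik
      have hnotin : i ∉ is := (List.nodup_cons.mp hnd).1
      have : ∀ (js : List Nat) (b' : List (List String)), i ∉ js →
          ((js.foldl (fun b k => b.set k (F (b.getD k []))) b').getD i []) = b'.getD i [] := by
        intro js
        induction js with
        | nil => intro b' _; rfl
        | cons k' js ih' =>
          intro b' hj
          rw [List.foldl_cons, ih' _ (by simp at hj; tauto)]
          rw [getD_set]
          have : k' ≠ i := by simp at hj; tauto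
          simp [this]
      rw [this is _ hnotin, getD_set]
      simp [hlt i (by simp)]
    · have his : i ∈ is := by simpa [hik] using hi
      rw [ih _ i (List.nodup_cons.mp hnd).2 (by intro k' hk'; rw [List.length_set]; exact hlt k' (by simp [hk'])) his]
      congr 1
      rw [getD_set]
      have hne : k ≠ i := fun h => hik h.symm
      simp [hne]

theorem mutA_eq {board : List (List String)} {n : Nat} (hlen : n ≤ board.length) :
    mutA board n = (List.range n).foldl (fun b i => b.set i (rowF n (b.getD i []))) board := by
  unfold mutA
  refine foldl_inv_congr (fun b => b.length = board.length) _ _ (List.range n) board rfl ?_ ?_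
  · intro b i hb hi
    rw [List.mem_range] at hi
    rw [innerA_eq (List.range n) b i (by omega)]
    rfl
  · intro b i hb
    have : ∀ (js : List Nat) (b' : List (List String)), b'.length = board.length →
        (js.foldl (fun b j => if bgetN b i j = "R" then b.modify i (fun r => r.set j "G") else b) b').length = board.length := by
      intro js
      induction js with
      | nil => intro b' h; exact h
      | cons k js ih' =>
        intro b' h
        rw [List.foldl_cons]
        apply ih'
        split_ifs
        · rw [List.length_modify]; exact h
        · exact h
    exact this (List.range n) b hb

theorem mut_boards_agree {N : Int} {board : List (List String)} (hpre : Pre_solution N board) :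
    ∀ i j : Nat, i < N.toNat → j < N.toNat → bgetN (mutA board N.toNat) i j = bgetN (colorblind board) i j := by
  obtain ⟨hlen, hrows⟩ := hpre
  intro i j hi hj
  have hib : i < board.length := by omega
  have hrow : N.toNat ≤ (board.getD i []).length := by
    rw [List.getD_eq_getElem board [] hib]
    refine hrows board[i] ?_
    have : (board.take N.toNat)[i]'(by simp; omega) = board[i] := List.getElem_take
    rw [← this]
    exact List.getElem_mem _
  have hjr : j < (board.getD i []).length := by omega
  -- left side: A's in-place mutation
  rw [bgetN, mutA_eq hlen,
    setfold_getD_mem (rowF N.toNat) (List.range N.toNat) board i (List.nodup_range)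
      (by intro k hk; rw [List.mem_range] at hk; omega) (by rw [List.mem_range]; exact hi)]
  rw [show rowF N.toNat (board.getD i []) = (List.range N.toNat).foldl rstep (board.getD i []) from rfl]
  rw [rowfold_getD_mem (List.range N.toNat) _ j (List.nodup_range) hjr (by rw [List.mem_range]; exact hj)]
  -- right side: B's freshly built colorblind board
  have hjr' : j < board[i].length := by rw [List.getD_eq_getElem board [] hib] at hjr; exact hjr
  rw [bgetN, colorblind]
  rw [List.getD_eq_getElem (board.map _) [] (by rw [List.length_map]; exact hib)]
  rw [List.getElem_map]
  rw [List.getD_eq_getElem (board[i].map _) "" (by rw [List.length_map]; exact hjr')]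
  rw [List.getElem_map]
  rw [List.getD_eq_getElem board [] hib]
  rw [List.getD_eq_getElem board[i] "" hjr']

-- ===== VERDICT (by name: the statement is the Claim_ definition above) =====
theorem solution_spec : Claim_equal_solution := by
  intro N board _ hpre
  unfold Spec_solution solution solution_alt
  refine Prod.ext ?_ ?_
  · simpa using countA_eq_countB board N.toNat
  · simpa using (countA_eq_countB (mutA board N.toNat) N.toNat).trans (countB_congr (mut_boards_agree hpre))
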